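-- pv_equiv track=rewrite | github.com/nuomimick/hadoop-spark | pyspark/demo1.py | nback
-- ===== SOURCE A (Python) =====
-- def nback(ls):
--     nums = 0
--     flag = True
--     for i in range(len(ls) - 1):
--         if flag and ls[i] > ls[i + 1]:
--             nums += 1
--             flag = False
--         elif not flag and ls[i] < ls[i + 1]:
--             nums += 1
--             flag = True
--     return nums
-- ===== SOURCE B (Python) =====
-- def nback(ls):
--     # Build the compressed list of strict adjacent directions (True = descent),
--     # collapsing consecutive equal directions; count follows by a closed form.
--     t = []
--     for a, b in zip(ls, ls[1:]):
--         if a != b: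
--             d = a > b
--             if not t or t[-1] != d:
--                 t.append(d)
--     if not t:
--         return 0
--     return len(t) if t[0] else len(t) - 1
-- ===== Notes on version B (the rewrite author's own statement) =====
-- stated objective: simpler
-- what changed: A's greedy toggle scan (a flag expecting a descent/ascent alternately) is replaced by building the run-compressed list of strict adjacent directions and reading the count off a closed form: its length, minus one when the first run is an ascent.
import Mathlib
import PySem

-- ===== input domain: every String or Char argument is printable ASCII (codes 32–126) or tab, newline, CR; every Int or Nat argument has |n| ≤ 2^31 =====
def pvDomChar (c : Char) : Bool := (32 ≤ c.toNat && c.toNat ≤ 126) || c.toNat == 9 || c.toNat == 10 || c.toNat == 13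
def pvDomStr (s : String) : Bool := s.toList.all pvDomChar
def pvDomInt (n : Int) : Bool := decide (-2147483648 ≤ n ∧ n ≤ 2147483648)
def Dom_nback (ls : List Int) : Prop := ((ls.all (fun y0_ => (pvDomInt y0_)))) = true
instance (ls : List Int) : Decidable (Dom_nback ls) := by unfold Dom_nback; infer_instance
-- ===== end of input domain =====

-- B replaces A's stateful toggle scan by a compressed list of strict adjacent directions plus a closed-form count (objective: simpler).

-- ===== PORT A =====
def nback (ls : List Int) : Int :=
  ((PySem.List.pyRange 0 ((ls.length : Int) - 1) 1).foldl
      (fun (s : Int × Bool) (i : Int) =>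
        if s.2 = true ∧ PySem.List.pyGetD ls i 0 > PySem.List.pyGetD ls (i + 1) 0 then
          (s.1 + 1, false)
        else if s.2 = false ∧ PySem.List.pyGetD ls i 0 < PySem.List.pyGetD ls (i + 1) 0 then
          (s.1 + 1, true)
        else s)
      (0, true)).1

-- ===== PORT B =====
-- one step of B's loop: append the direction d of a strict pair unless it repeats the last run
def nbStep (t : List Bool) (p : Int × Int) : List Bool :=
  if p.1 ≠ p.2 then
    let d : Bool := decide (p.1 > p.2)
    if t = [] ∨ t.getLast? ≠ some d then t ++ [d] else t
  else t

def nback_alt (ls : List Int) : Int :=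
  let t := (ls.zip ls.tail).foldl nbStep []
  match t with
  | [] => 0
  | d :: r => if d then (r.length : Int) + 1 else (r.length : Int)

-- ===== PRECONDITION & SPEC =====
def Spec_nback (ls : List Int) (out : Int) : Prop := out = nback_alt ls
instance (ls : List Int) (out : Int) : Decidable (Spec_nback ls out) := by unfold Spec_nback; infer_instance

-- ===== CLAIM (what is proved, stated in full; the proofs are below) =====
def Claim_equal_nback : Prop := ∀ (ls : List Int), Dom_nback ls → Spec_nback ls (nback ls)

-- ===== LEMMAS AND PROOFS =====

-- A's loop body, on the pair of neighbouring values
def nbFa (s : Int × Bool) (p : Int × Int) : Int × Bool :=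
  if s.2 = true ∧ p.1 > p.2 then (s.1 + 1, false)
  else if s.2 = false ∧ p.1 < p.2 then (s.1 + 1, true)
  else s

-- the count B's closed form reads off a compressed direction list
def nbScore (t : List Bool) : Int :=
  match t with
  | [] => 0
  | d :: r => if d then (r.length : Int) + 1 else (r.length : Int)

-- the flag A would hold after producing compressed direction list t
def nbFlag (t : List Bool) : Bool :=
  match t.getLast? with
  | some true => false
  | _ => true

lemma nbScore_concat (t : List Bool) (d : Bool) :
    nbScore (t ++ [d]) = if t = [] then (if d then 1 else 0) else nbScore t + 1 := by
  cases t with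
  | nil => cases d <;> simp [nbScore]
  | cons h r => simp [nbScore, List.length_append]; split_ifs <;> ring

lemma nbScore_concat2 (q : List Bool) (x y : Bool) :
    nbScore (q ++ [x, y]) = nbScore (q ++ [x]) + 1 := by
  rw [show q ++ [x, y] = (q ++ [x]) ++ [y] by simp, nbScore_concat]; simp

-- one step preserves the (score, flag) abstraction of B's compressed list
lemma nb_step (t : List Bool) (p : Int × Int) :
    nbFa (nbScore t, nbFlag t) p = (nbScore (nbStep t p), nbFlag (nbStep t p)) := by
  obtain ⟨a, b⟩ := p
  by_cases hab : a = b
  · subst hab; simp [nbFa, nbStep]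
  · rcases t.eq_nil_or_concat with rfl | ⟨q, d0, rfl⟩
    · rcases lt_or_gt_of_ne hab with h | h <;>
        simp [nbFa, nbStep, nbFlag, nbScore, hab, h, asymm h]
    · have hl : (q ++ [d0]).getLast? = some d0 := List.getLast?_concat
      cases d0 <;> rcases lt_or_gt_of_ne hab with h | h <;>
        simp [nbFa, nbStep, hab, h, asymm h, hl, nbFlag, nbScore_concat, nbScore_concat2]

-- A's and B's whole loops stay in step under the (score, flag) abstraction
lemma nb_fold (P : List (Int × Int)) (t : List Bool) :
    P.foldl nbFa (nbScore t, nbFlag t)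
      = (nbScore (P.foldl nbStep t), nbFlag (P.foldl nbStep t)) := by
  induction P generalizing t with
  | nil => rfl
  | cons p P ih => simp [List.foldl_cons, nb_step, ih]

-- A's index loop over Nat indices, rewritten as a fold over neighbouring pairs
lemma range_to_zip (ls : List Int) (s : Int × Bool) :
    (List.range (ls.length - 1)).foldl
        (fun s i => nbFa s (ls.getD i 0, ls.getD (i + 1) 0)) s
      = (ls.zip ls.tail).foldl nbFa s := by
  induction ls generalizing s with
  | nil => rfl
  | cons a rest ih =>
    cases rest with
    | nil => rfl
    | cons b r2 =>
      have h1 : (a :: b :: r2).length - 1 = r2.length + 1 := by simp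
      rw [h1, List.range_succ_eq_map, List.foldl_cons, List.foldl_map]
      simp only [List.getD_cons_succ, List.getD_cons_zero, Nat.succ_eq_add_one]
      have := ih (nbFa s (a, b))
      simp only [List.length_cons, Nat.add_sub_cancel] at this
      simpa using this

-- A's port, rewritten as a fold of nbFa over neighbouring pairs
lemma nback_pairs (ls : List Int) :
    nback ls = ((ls.zip ls.tail).foldl nbFa (0, true)).1 := by
  unfold nback
  cases ls with
  | nil => rfl
  | cons a rest =>
    have h1 : ((a :: rest).length : Int) - 1 = ((rest.length : Nat) : Int) := by simp
    rw [h1, PySem.List.pyRange_zero_natCast, List.foldl_map]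
    have hcast : ∀ (i : Nat), ((i : Int) + 1) = (((i + 1 : Nat)) : Int) := by
      intro i; push_cast; ring
    simp only [hcast, PySem.List.pyGetD_natCast]
    have := range_to_zip (a :: rest) (0, true)
    simp only [List.length_cons, Nat.add_sub_cancel] at this
    rw [← this]
    rfl

-- ===== VERDICT (by name: the statement is the Claim_ definition above) =====
theorem nback_spec : Claim_equal_nback := by
  intro ls _
  unfold Spec_nback nback_alt
  rw [nback_pairs]
  have h := nb_fold (ls.zip ls.tail) []
  simp only [nbScore, nbFlag, List.getLast?_nil] at h
  rw [h]
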